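-- pv_equiv track=rewrite | github.com/dmwsdq/skipped-files-check | SkippedFilesCheck.py | getMissingPageTable
-- ===== SOURCE A (Python) =====
-- def getMissingPageTable(docPageTable):
--     '''Menghasilkan missingPageTable dari docPageTable. missingPageTable merupakan tabel yang
--     memuat dugaan page yang dilewatkan, jika dilihat dari urutan, dalam setiap doc di docPageTable.
--     Dengan demikian missingPageTable tidak memuat file yang tergolong 'OTHER'.
--     missingPageTable juga disusun dengan dikelompokkan berdasarkan doc. Formatnya sama dengan docPageTable, sbb:
--     missingPageTable = {'M1':[6,11,40],'M3':[6],...}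
--     Digunakan oleh: checkSkippedFiles()'''
--     missingPageTable = {}
--     #lingkup se-direktori
--     for theDoc in docPageTable:
--         #lingkup se-doc
--         if theDoc == 'OTHER':
--             continue
--         theDocPages = docPageTable[theDoc]
--         maxPage     = max(theDocPages)
--         for i in range(1,maxPage):
--             #lingkup satu file / satu page
--             if i not in theDocPages:
--                 if theDoc not in missingPageTable:
--                     missingPageTable[theDoc] = []
--                 missingPageTable[theDoc].append(i)
--     return missingPageTable
-- ===== SOURCE B (Python) =====
-- def getMissingPageTable(docPageTable):
--     """Same result as A: per non-'OTHER' doc, the pages skipped below max(pages).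
--     Instead of testing every candidate page for membership, sort the distinct
--     pages once and emit the gap between each consecutive pair."""
--     missingPageTable = {}
--     for theDoc, pages in docPageTable.items():
--         if theDoc == 'OTHER':
--             continue
--         gaps = []
--         prev = 0
--         for p in sorted(set(pages)):
--             if p < 1:
--                 continue
--             gaps.extend(range(prev + 1, p))
--             prev = p
--         if gaps:
--             missingPageTable[theDoc] = gaps
--     return missingPageTable
-- ===== Notes on version B (the rewrite author's own statement) =====
-- stated objective: faster
-- what changed: A scans every candidate i in range(1,max) and tests list membership per candidate; B never tests membership: it sorts the distinct pages once and walks the sorted list emitting range(prev+1,p) between consecutive pages, assigning the gap list at once only when non-empty.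
-- outside the precondition, e.g. on getMissingPageTable({'M1': []}): A raises ValueError, B returns {}
import Mathlib
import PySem

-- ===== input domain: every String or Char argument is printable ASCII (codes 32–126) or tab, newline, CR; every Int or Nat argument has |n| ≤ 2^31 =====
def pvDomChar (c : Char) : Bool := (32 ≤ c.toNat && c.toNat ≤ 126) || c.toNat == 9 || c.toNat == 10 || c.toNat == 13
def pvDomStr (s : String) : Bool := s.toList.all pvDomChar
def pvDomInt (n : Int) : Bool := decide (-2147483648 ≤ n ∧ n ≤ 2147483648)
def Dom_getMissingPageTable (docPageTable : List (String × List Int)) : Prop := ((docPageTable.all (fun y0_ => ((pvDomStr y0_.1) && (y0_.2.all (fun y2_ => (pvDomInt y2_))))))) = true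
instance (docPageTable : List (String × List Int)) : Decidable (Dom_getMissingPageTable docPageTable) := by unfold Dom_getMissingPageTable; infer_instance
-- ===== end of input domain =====

-- B replaces A's per-candidate membership-scan by sorting the distinct pages once and emitting the gaps between consecutive pages; objective: faster (measured).


-- ===== PORT A =====
-- the body of A's inner 'for i in range(1, maxPage)' loop
def pvBodyA (theDocPages : List Int) (theDoc : String)
    (m : PySem.Dict String (List Int)) (i : Int) : PySem.Dict String (List Int) :=
  if theDocPages.contains i then m
  else
    let m' := if (PySem.Dict.get? m theDoc).isNone
              then m.insert theDoc ([] : List Int) else m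
    m'.modify theDoc [] (fun l => l ++ [i])

-- one iteration of A's outer 'for theDoc in docPageTable' body
def pvStepA (docPageTable : List (String × List Int)) (mpt : PySem.Dict String (List Int))
    (entry : String × List Int) : PySem.Dict String (List Int) :=
  let theDoc := entry.1
  if theDoc == "OTHER" then mpt
  else
    match PySem.Dict.get? ⟨docPageTable⟩ theDoc with        -- theDocPages = docPageTable[theDoc]
    | none => mpt                                            -- unreachable: theDoc is a key of the table
    | some theDocPages =>
      match PySem.List.max? theDocPages (fun x => x) with    -- maxPage = max(theDocPages)
      | none => mpt                                          -- max([]) raises ValueError; excluded by Pre_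
      | some maxPage =>
        (PySem.List.pyRange 1 maxPage 1).foldl (pvBodyA theDocPages theDoc) mpt

def getMissingPageTable (docPageTable : List (String × List Int)) : List (String × List Int) :=
  (docPageTable.foldl (pvStepA docPageTable) ⟨[]⟩).items

-- ===== PORT B =====
-- the body of B's inner 'for p in sorted(set(pages))' loop: state = (gaps, prev)
def pvGapStep (st : List Int × Int) (p : Int) : List Int × Int :=
  if p < 1 then st
  else (st.1 ++ PySem.List.pyRange (st.2 + 1) p 1, p)       -- gaps.extend(range(prev+1, p)); prev = p

-- one iteration of B's 'for theDoc, pages in docPageTable.items()' body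
def pvStepB (mpt : PySem.Dict String (List Int)) (entry : String × List Int) :
    PySem.Dict String (List Int) :=
  if entry.1 == "OTHER" then mpt
  else
    let st := (PySem.List.sorted (PySem.Set.ofList entry.2) (fun x => x) false).foldl
                pvGapStep ([], 0)
    if st.1.isEmpty then mpt else mpt.insert entry.1 st.1

def getMissingPageTable_alt (docPageTable : List (String × List Int)) : List (String × List Int) :=
  (docPageTable.foldl pvStepB ⟨[]⟩).items

-- ===== PRECONDITION & SPEC =====
-- Pre_ excludes (i) tables where some non-'OTHER' document has an empty page list, on which
-- A (and only A) raises ValueError from max([]); and (ii) association lists with duplicate doc keys,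
-- which a Python dict cannot even represent (duplicates collapse before A is called).
def Pre_getMissingPageTable (docPageTable : List (String × List Int)) : Prop :=
  (docPageTable.map Prod.fst).Nodup ∧
  ∀ e ∈ docPageTable, e.1 ≠ "OTHER" → e.2 ≠ []
instance (docPageTable : List (String × List Int)) : Decidable (Pre_getMissingPageTable docPageTable) := by
  unfold Pre_getMissingPageTable; infer_instance

def pvWitness_getMissingPageTable : (List (String × List Int)) :=
  [("M1", [3, 1]), ("OTHER", []), ("M2", [1, 2])]

def Spec_getMissingPageTable (docPageTable : List (String × List Int)) (out : List (String × List Int)) : Prop := out = getMissingPageTable_alt docPageTable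
instance (docPageTable : List (String × List Int)) (out : List (String × List Int)) : Decidable (Spec_getMissingPageTable docPageTable out) := by unfold Spec_getMissingPageTable; infer_instance

-- ===== CLAIM (what is proved, stated in full; the proofs are below) =====
def Claim_equal_getMissingPageTable : Prop := ∀ (docPageTable : List (String × List Int)), Dom_getMissingPageTable docPageTable → Pre_getMissingPageTable docPageTable → Spec_getMissingPageTable docPageTable (getMissingPageTable docPageTable)

-- ===== LEMMAS AND PROOFS =====

-- ---- generic facts about the association-list dict when a key is absent / sits last ----

theorem pv_find_append (m0 : List (String × List Int)) (d : String) (acc : List Int)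
    (h : d ∉ m0.map Prod.fst) :
    List.find? (fun p => p.1 == d) (m0 ++ [(d, acc)]) = some (d, acc) := by
  induction m0 with
  | nil => simp
  | cons a t ih =>
    simp only [List.map_cons, List.mem_cons, not_or] at h
    simp only [List.cons_append, List.find?_cons]
    have : (a.1 == d) = false := beq_eq_false_iff_ne.mpr (fun hEq => h.1 hEq.symm)
    rw [this]
    exact ih h.2

theorem pv_get?_append (m0 : List (String × List Int)) (d : String) (acc : List Int)
    (h : d ∉ m0.map Prod.fst) :
    PySem.Dict.get? ⟨m0 ++ [(d, acc)]⟩ d = some acc := by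
  simp [PySem.Dict.get?, pv_find_append m0 d acc h]

theorem pv_get?_absent (m : List (String × List Int)) (d : String)
    (h : d ∉ m.map Prod.fst) :
    PySem.Dict.get? ⟨m⟩ d = none := by
  simp only [PySem.Dict.get?, Option.map_eq_none_iff]
  rw [List.find?_eq_none]
  intro p hp
  simp only [beq_iff_eq]
  intro hpd
  exact h (hpd ▸ List.mem_map_of_mem hp)

theorem pv_replace (m0 : List (String × List Int)) (d : String) (acc v : List Int)
    (h : d ∉ m0.map Prod.fst) :
    (m0 ++ [(d, acc)]).map (fun p => if p.1 == d then (d, v) else p) = m0 ++ [(d, v)] := by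
  induction m0 with
  | nil => simp
  | cons a t ih =>
    simp only [List.map_cons, List.mem_cons, not_or] at h
    simp only [List.cons_append, List.map_cons]
    have : (a.1 == d) = false := beq_eq_false_iff_ne.mpr (fun hEq => h.1 hEq.symm)
    rw [this]
    simp only [ih h.2]
    rfl

theorem pv_insert_append (m0 : List (String × List Int)) (d : String) (acc v : List Int)
    (h : d ∉ m0.map Prod.fst) :
    PySem.Dict.insert ⟨m0 ++ [(d, acc)]⟩ d v = ⟨m0 ++ [(d, v)]⟩ := by
  have hc : PySem.Dict.contains (⟨m0 ++ [(d, acc)]⟩ : PySem.Dict String (List Int)) d = true := by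
    simp [PySem.Dict.contains]
  unfold PySem.Dict.insert
  rw [if_pos hc]
  exact congrArg PySem.Dict.mk (pv_replace m0 d acc v h)

theorem pv_insert_absent (m : List (String × List Int)) (d : String) (v : List Int)
    (h : d ∉ m.map Prod.fst) :
    PySem.Dict.insert ⟨m⟩ d v = ⟨m ++ [(d, v)]⟩ := by
  have hc : PySem.Dict.contains (⟨m⟩ : PySem.Dict String (List Int)) d = false := by
    simp only [PySem.Dict.contains, List.any_eq_false]
    intro p hp
    simp only [beq_iff_eq]
    intro hpd
    exact h (hpd ▸ List.mem_map_of_mem hp)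
  unfold PySem.Dict.insert
  rw [if_neg (by rw [hc]; exact Bool.false_ne_true)]

-- ---- A's inner page loop, characterised ----

theorem pv_bodyA_skip (pages : List Int) (d : String) (m : PySem.Dict String (List Int)) (i : Int)
    (hc : pages.contains i = true) : pvBodyA pages d m i = m := by
  unfold pvBodyA
  rw [if_pos hc]

theorem pv_bodyA_present (pages : List Int) (d : String) (m0 : List (String × List Int))
    (acc : List Int) (i : Int) (h : d ∉ m0.map Prod.fst) (hc : pages.contains i = false) :
    pvBodyA pages d ⟨m0 ++ [(d, acc)]⟩ i = ⟨m0 ++ [(d, acc ++ [i])]⟩ := by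
  have hg := pv_get?_append m0 d acc h
  simp only [pvBodyA, hc, Bool.false_eq_true, if_false, hg, Option.isNone_some,
    PySem.Dict.modify, PySem.Dict.getD, Option.getD_some]
  exact pv_insert_append m0 d acc (acc ++ [i]) h

theorem pv_bodyA_new (pages : List Int) (d : String) (m : List (String × List Int)) (i : Int)
    (h : d ∉ m.map Prod.fst) (hc : pages.contains i = false) :
    pvBodyA pages d ⟨m⟩ i = ⟨m ++ [(d, [i])]⟩ := by
  have hg := pv_get?_absent m d h
  simp only [pvBodyA, hc, Bool.false_eq_true, if_false, hg, Option.isNone_none, if_true,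
    pv_insert_absent m d [] h, PySem.Dict.modify, PySem.Dict.getD, pv_get?_append m d [] h,
    Option.getD_some, List.nil_append, pv_insert_append m d [] [i] h]

theorem pv_innerA_present (pages : List Int) (d : String) :
    ∀ (L : List Int) (m0 : List (String × List Int)) (acc : List Int),
      d ∉ m0.map Prod.fst →
      L.foldl (pvBodyA pages d) ⟨m0 ++ [(d, acc)]⟩
      = ⟨m0 ++ [(d, acc ++ L.filter (fun i => !pages.contains i))]⟩ := by
  intro L
  induction L with
  | nil => intro m0 acc h; simp
  | cons i L ih =>
    intro m0 acc h
    by_cases hc : pages.contains i = true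
    · have hp : (!pages.contains i) = false := by rw [hc]; rfl
      rw [List.foldl_cons, pv_bodyA_skip pages d _ i hc, ih m0 acc h, List.filter_cons, hp]
      simp
    · have hcf : pages.contains i = false := eq_false_of_ne_true hc
      have hp : (!pages.contains i) = true := by rw [hcf]; rfl
      rw [List.foldl_cons, pv_bodyA_present pages d m0 acc i h hcf, ih m0 (acc ++ [i]) h,
        List.filter_cons, hp]
      simp

theorem pv_innerA_absent (pages : List Int) (d : String) :
    ∀ (L : List Int) (m : List (String × List Int)),
      d ∉ m.map Prod.fst →
      L.foldl (pvBodyA pages d) ⟨m⟩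
      = if L.filter (fun i => !pages.contains i) = [] then ⟨m⟩
        else ⟨m ++ [(d, L.filter (fun i => !pages.contains i))]⟩ := by
  intro L
  induction L with
  | nil => intro m h; simp
  | cons i L ih =>
    intro m h
    by_cases hc : pages.contains i = true
    · have hp : (!pages.contains i) = false := by rw [hc]; rfl
      rw [List.foldl_cons, pv_bodyA_skip pages d _ i hc, ih m h, List.filter_cons, hp]
      simp
    · have hcf : pages.contains i = false := eq_false_of_ne_true hc
      have hp : (!pages.contains i) = true := by rw [hcf]; rfl
      rw [List.foldl_cons, pv_bodyA_new pages d m i h hcf,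
        pv_innerA_present pages d L m [i] h, List.filter_cons, hp]
      simp

-- ---- B's gap-filling fold, characterised ----
-- final prev of the fold, as a standalone fold
def pvMaxEnd (S : List Int) (prev : Int) : Int :=
  S.foldl (fun a p => if p < 1 then a else p) prev

theorem pv_le_maxEnd (S : List Int) (hS : S.Pairwise (· < ·)) :
    ∀ p : Int, (∀ x ∈ S, p < x) → p ≤ pvMaxEnd S p := by
  induction S with
  | nil => intro p _; exact le_refl _
  | cons q S ih =>
    rcases List.pairwise_cons.mp hS with ⟨hqS, hS'⟩
    intro p hp
    have hq := hp q List.mem_cons_self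
    by_cases h1 : q < 1
    · have : pvMaxEnd (q :: S) p = pvMaxEnd S p := by simp [pvMaxEnd, h1]
      rw [this]
      exact ih hS' p (fun x hx => hp x (List.mem_cons_of_mem _ hx))
    · have : pvMaxEnd (q :: S) p = pvMaxEnd S q := by simp [pvMaxEnd, h1]
      rw [this]
      exact le_trans (le_of_lt hq) (ih hS' q hqS)

theorem pv_gap (S : List Int) (hS : S.Pairwise (· < ·)) :
    ∀ (g : List Int) (prev : Int), 0 ≤ prev → (∀ x ∈ S, 1 ≤ x → prev < x) →
    S.foldl pvGapStep (g, prev)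
      = (g ++ (PySem.List.pyRange (prev + 1) (pvMaxEnd S prev) 1).filter
            (fun i => !S.contains i),
         pvMaxEnd S prev) := by
  induction S with
  | nil =>
    intro g prev _ _
    have : PySem.List.pyRange (prev + 1) prev 1 = [] :=
      PySem.List.pyRange_one_eq_nil (by omega)
    simp [pvMaxEnd, this]
  | cons p S ih =>
    intro g prev hprev hlt
    rcases List.pairwise_cons.mp hS with ⟨hpS, hS'⟩
    by_cases hp : p < 1
    · have hstep : pvGapStep (g, prev) p = (g, prev) := by simp [pvGapStep, hp]
      have hend : pvMaxEnd (p :: S) prev = pvMaxEnd S prev := by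
        simp [pvMaxEnd, hp]
      rw [List.foldl_cons, hstep, hend,
        ih hS' g prev hprev (fun x hx h1 => hlt x (List.mem_cons_of_mem _ hx) h1)]
      have : (PySem.List.pyRange (prev + 1) (pvMaxEnd S prev) 1).filter
          (fun i => !S.contains i)
        = (PySem.List.pyRange (prev + 1) (pvMaxEnd S prev) 1).filter
          (fun i => !(p :: S).contains i) := by
        apply List.filter_congr
        intro i hi
        have hib := (PySem.List.mem_pyRange_one.mp hi).1
        have hne : i ≠ p := by omega
        simp [hne]
      rw [this]
    · rw [not_lt] at hp
      have hstep : pvGapStep (g, prev) p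
          = (g ++ PySem.List.pyRange (prev + 1) p 1, p) := by
        simp [pvGapStep, not_lt.mpr hp]
      have hend : pvMaxEnd (p :: S) prev = pvMaxEnd S p := by
        simp [pvMaxEnd, not_lt.mpr hp]
      have hprevp : prev < p := hlt p List.mem_cons_self hp
      have hple : p ≤ pvMaxEnd S p := pv_le_maxEnd S hS' p hpS
      rw [List.foldl_cons, hstep, hend,
        ih hS' (g ++ PySem.List.pyRange (prev + 1) p 1) p (by omega)
          (fun x hx _ => hpS x hx)]
      have hsplit : PySem.List.pyRange (prev + 1) (pvMaxEnd S p) 1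
          = PySem.List.pyRange (prev + 1) p 1 ++ PySem.List.pyRange p (pvMaxEnd S p) 1 :=
        PySem.List.pyRange_one_append _ _ _ (by omega) hple
      have hfilt1 : (PySem.List.pyRange (prev + 1) p 1).filter
          (fun i => !(p :: S).contains i) = PySem.List.pyRange (prev + 1) p 1 := by
        apply List.filter_eq_self.mpr
        intro i hi
        have hib := PySem.List.mem_pyRange_one.mp hi
        have h1 : (i == p) = false := by
          simp only [beq_eq_false_iff_ne, ne_eq]; omega
        have h2 : S.contains i = false := by
          simp only [List.contains_eq_mem, decide_eq_false_iff_not]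
          intro hiS
          have := hpS i hiS
          omega
        rw [List.contains_cons, h1, h2]
        rfl
      have hfilt2 : (PySem.List.pyRange p (pvMaxEnd S p) 1).filter
          (fun i => !(p :: S).contains i)
          = (PySem.List.pyRange (p + 1) (pvMaxEnd S p) 1).filter
            (fun i => !S.contains i) := by
        by_cases hpe : p < pvMaxEnd S p
        · rw [PySem.List.pyRange_one_cons hpe]
          have hself : ((p : Int) == p) = true := by simp
          have hrest : (PySem.List.pyRange (p + 1) (pvMaxEnd S p) 1).filter
              (fun i => !(p :: S).contains i)
              = (PySem.List.pyRange (p + 1) (pvMaxEnd S p) 1).filter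
                (fun i => !S.contains i) := by
            apply List.filter_congr
            intro i hi
            have hib := (PySem.List.mem_pyRange_one.mp hi).1
            have : (i == p) = false := by
              simp only [beq_eq_false_iff_ne, ne_eq]; omega
            rw [List.contains_cons, this, Bool.false_or]
          rw [List.filter_cons]
          simp only [List.contains_cons, hself, Bool.true_or, Bool.not_true,
            Bool.false_eq_true, if_false]
          exact hrest
        · have h1 : PySem.List.pyRange p (pvMaxEnd S p) 1 = [] :=
            PySem.List.pyRange_one_eq_nil (by omega)
          have h2 : PySem.List.pyRange (p + 1) (pvMaxEnd S p) 1 = [] :=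
            PySem.List.pyRange_one_eq_nil (by omega)
          rw [h1, h2]
          simp
      rw [hsplit, List.filter_append, hfilt1, hfilt2, List.append_assoc]

theorem pv_maxEnd_const (S : List Int) (prev : Int) (h : ∀ x ∈ S, x < 1) :
    pvMaxEnd S prev = prev := by
  induction S generalizing prev with
  | nil => rfl
  | cons p S ih =>
    have hp : p < 1 := h p List.mem_cons_self
    have : pvMaxEnd (p :: S) prev = pvMaxEnd S prev := by simp [pvMaxEnd, hp]
    rw [this]
    exact ih prev (fun x hx => h x (List.mem_cons_of_mem _ hx))

theorem pv_maxEnd_last (S : List Int) : ∀ (prev : Int) (h : S ≠ []),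
    1 ≤ S.getLast h → pvMaxEnd S prev = S.getLast h := by
  induction S with
  | nil => intro prev h; exact absurd rfl h
  | cons p S ih =>
    cases S with
    | nil =>
      intro prev h hone
      have hl : (p :: ([] : List Int)).getLast h = p := rfl
      rw [hl] at hone ⊢
      simp [pvMaxEnd, not_lt.mpr hone]
    | cons q S' =>
      intro prev h hone
      have hSne : (q :: S') ≠ [] := List.cons_ne_nil _ _
      have hl : (p :: q :: S').getLast h = (q :: S').getLast hSne := List.getLast_cons hSne
      rw [hl] at hone ⊢
      have hfold : pvMaxEnd (p :: q :: S') prev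
          = pvMaxEnd (q :: S') (if p < 1 then prev else p) := by
        by_cases hp : p < 1 <;> simp [pvMaxEnd, hp]
      rw [hfold]
      exact ih _ hSne hone

theorem pv_le_getLast : ∀ (S : List Int), S.Pairwise (· < ·) → ∀ (h : S ≠ []),
    ∀ x ∈ S, x ≤ S.getLast h := by
  intro S
  induction S with
  | nil => intro _ h; exact absurd rfl h
  | cons p S ih =>
    cases S with
    | nil =>
      intro _ h x hx
      rcases List.mem_singleton.mp hx with rfl
      exact le_refl _
    | cons q S' =>
      intro hS h x hx
      rcases List.pairwise_cons.mp hS with ⟨hpS, hS'⟩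
      have hSne : (q :: S') ≠ [] := List.cons_ne_nil _ _
      rw [List.getLast_cons hSne]
      rcases List.mem_cons.mp hx with rfl | hx'
      · exact le_of_lt (hpS _ (List.getLast_mem hSne))
      · exact ih hS' hSne x hx'

-- B's inner loop produces exactly A's missing list
theorem pv_missing (pages : List Int) (M : Int)
    (hM : PySem.List.max? pages (fun x => x) = some M) :
    ((PySem.List.sorted (PySem.Set.ofList pages) (fun x => x) false).foldl pvGapStep ([], 0)).1
    = (PySem.List.pyRange 1 M 1).filter (fun i => !pages.contains i) := by
  have hS : (PySem.List.sorted (PySem.Set.ofList pages) (fun x => x) false).Pairwise (· < ·) :=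
    PySem.List.sorted_ofList_pairwise_lt pages
  set S := PySem.List.sorted (PySem.Set.ofList pages) (fun x => x) false with hSdef
  have hmem : ∀ x : Int, x ∈ S ↔ x ∈ pages := by
    intro x
    rw [hSdef, PySem.List.mem_sorted, PySem.Set.mem_ofList]
  have hMmax : ∀ y ∈ pages, y ≤ M := PySem.List.max?_isMax hM
  have hMmem : M ∈ pages := PySem.List.max?_mem hM
  rw [pv_gap S hS [] 0 (le_refl 0) (fun x _ h1 => by omega)]
  simp only [List.nil_append]
  have hfe : (fun i => !S.contains i) = (fun i => !pages.contains i) := by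
    funext i
    by_cases h : i ∈ pages <;>
      simp [List.contains_eq_mem, hmem, h]
  rw [hfe]
  by_cases h1 : 1 ≤ M
  · have hSne : S ≠ [] := by
      intro h
      rw [h] at hmem
      exact (List.not_mem_nil) ((hmem M).mpr hMmem)
    have hlast : S.getLast hSne = M :=
      le_antisymm (hMmax _ ((hmem _).mp (List.getLast_mem hSne)))
        (pv_le_getLast S hS hSne M ((hmem M).mpr hMmem))
    rw [pv_maxEnd_last S 0 hSne (by rw [hlast]; exact h1), hlast]
    norm_num
  · have hall : ∀ x ∈ S, x < 1 := by
      intro x hx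
      have := hMmax x ((hmem x).mp hx)
      omega
    rw [pv_maxEnd_const S 0 hall,
      PySem.List.pyRange_one_eq_nil (by omega : (0 : Int) ≤ 0 + 1),
      PySem.List.pyRange_one_eq_nil (by omega : (M : Int) ≤ 1)]

-- ---- table lookup under distinct keys ----

theorem pv_lookup (t : List (String × List Int)) (e : String × List Int)
    (ht : (t.map Prod.fst).Nodup) (he : e ∈ t) :
    PySem.Dict.get? ⟨t⟩ e.1 = some e.2 := by
  induction t with
  | nil => cases he
  | cons a t ih =>
    simp only [List.map_cons, List.nodup_cons] at ht
    rcases List.mem_cons.mp he with rfl | he'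
    · simp [PySem.Dict.get?]
    · have hne : (a.1 == e.1) = false := by
        simp only [beq_eq_false_iff_ne, ne_eq]
        intro hEq
        exact ht.1 (hEq ▸ List.mem_map_of_mem he')
      simp only [PySem.Dict.get?, List.find?_cons, hne] at ih ⊢
      exact ih ht.2 he'

-- ---- the two loop bodies agree on a fresh key; B's body only adds its own key ----

theorem pv_step_eq (t : List (String × List Int))
    (ht : (t.map Prod.fst).Nodup) (hne : ∀ e ∈ t, e.1 ≠ "OTHER" → e.2 ≠ [])
    (e : String × List Int) (he : e ∈ t) (m : PySem.Dict String (List Int))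
    (hm : e.1 ∉ m.items.map Prod.fst) :
    pvStepA t m e = pvStepB m e := by
  obtain ⟨ml⟩ := m
  by_cases ho : e.1 = "OTHER"
  · simp [pvStepA, pvStepB, ho]
  · have hbo : (e.1 == "OTHER") = false := beq_eq_false_iff_ne.mpr ho
    have hpne : e.2 ≠ [] := hne e he ho
    obtain ⟨M, hM⟩ : ∃ M, PySem.List.max? e.2 (fun x => x) = some M := by
      cases hp2 : e.2 with
      | nil => exact absurd hp2 hpne
      | cons a l => exact ⟨l.foldl max a, by rw [PySem.List.max?_id_cons]⟩
    simp only [pvStepA, pvStepB, hbo, Bool.false_eq_true, if_false, pv_lookup t e ht he, hM,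
      pv_missing e.2 M hM]
    rw [pv_innerA_absent e.2 e.1 (PySem.List.pyRange 1 M 1) ml hm]
    by_cases hf : (PySem.List.pyRange 1 M 1).filter (fun i => !e.2.contains i) = []
    · rw [if_pos hf, hf]
      simp
    · rw [if_neg hf, if_neg (fun hcontra => hf (List.isEmpty_iff.mp hcontra)),
        pv_insert_absent ml e.1 _ hm]

theorem pv_keys_stepB (m : PySem.Dict String (List Int)) (e : String × List Int) :
    ∀ k ∈ (pvStepB m e).items.map Prod.fst, k = e.1 ∨ k ∈ m.items.map Prod.fst := by
  intro k hk
  simp only [pvStepB] at hk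
  split at hk
  · exact Or.inr hk
  · split at hk
    · exact Or.inr hk
    · unfold PySem.Dict.insert at hk
      split at hk
      · simp only [List.map_map, List.mem_map] at hk
        obtain ⟨p, hp, hpk⟩ := hk
        by_cases hpe : (p.1 == e.1) = true
        · simp only [Function.comp_apply, hpe, if_pos] at hpk
          exact Or.inl hpk.symm
        · simp only [Function.comp_apply, hpe, Bool.false_eq_true, if_false] at hpk
          exact Or.inr (hpk ▸ List.mem_map_of_mem hp)
      · simp only [List.map_append, List.mem_append, List.map_cons, List.map_nil,
          List.mem_cons] at hk
        rcases hk with hk | hk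
        · exact Or.inr hk
        · exact Or.inl (hk.resolve_right (List.not_mem_nil))

-- ---- the whole fold ----

theorem pv_outer (t : List (String × List Int))
    (ht : (t.map Prod.fst).Nodup) (hne : ∀ e ∈ t, e.1 ≠ "OTHER" → e.2 ≠ []) :
    ∀ (rest : List (String × List Int)) (m : PySem.Dict String (List Int)),
      (∀ e ∈ rest, e ∈ t) → (∀ e ∈ rest, e.1 ∉ m.items.map Prod.fst) →
      (rest.map Prod.fst).Nodup →
      rest.foldl (pvStepA t) m = rest.foldl pvStepB m := by
  intro rest
  induction rest with
  | nil => intro m _ _ _; rfl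
  | cons e rest ih =>
    intro m hmem hfresh hnd
    simp only [List.map_cons, List.nodup_cons] at hnd
    have hstep := pv_step_eq t ht hne e (hmem e List.mem_cons_self) m
      (hfresh e List.mem_cons_self)
    simp only [List.foldl_cons, hstep]
    apply ih
    · intro f hf; exact hmem f (List.mem_cons_of_mem _ hf)
    · intro f hf hin
      rcases pv_keys_stepB m e f.1 hin with h1 | h1
      · exact hnd.1 (h1 ▸ List.mem_map_of_mem hf)
      · exact hfresh f (List.mem_cons_of_mem _ hf) h1
    · exact hnd.2

-- ===== VERDICT (by name: the statement is the Claim_ definition above) =====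
theorem getMissingPageTable_spec : Claim_equal_getMissingPageTable := by
  intro t _ hpre
  unfold Spec_getMissingPageTable getMissingPageTable getMissingPageTable_alt
  rw [pv_outer t hpre.1 hpre.2 t ⟨[]⟩ (fun _ h => h) (by intro e _ h; cases h) hpre.1]
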